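-- pv_equiv track=rewrite | github.com/Giianmachado/vrp-genetic-algorithm | src/GA.py | changePosition
-- ===== SOURCE A (Python) =====
-- def changePosition(a, b, p):
--
--     # loop
--     for i in range(len(p) - 1):
--
--         # cut gene 1
--         if i % 2 == 0:
--
--             # loop
--             for j in range(p[i], p[i + 1]):
--
--                 # get pos
--                 pos = list(a).index(b[j])
--
--                 # # change a with value b
--                 a[pos] = a[j]
--
--                 # and other replace
--                 a[j] = b[j]
--
--     # return
--     return a
-- ===== SOURCE B (Python) =====
-- # B: models each swap as a transposition of POSITIONS: it tracks the index permutation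
-- # (cur/loc inverse arrays) against a value->original-index map built once and never updated,
-- # and materialises the result in one final pass (return-value equivalence; both mutate a in place).
-- def changePosition(a, b, p):
--     a0 = a[:]
--     n = len(a0)
--     orig_index = {v: k for k, v in enumerate(a0)}
--     cur = list(range(n))   # cur[q]: original index of the value now at position q
--     loc = list(range(n))   # loc[k]: current position of the original value a0[k]
--     for i in range(0, len(p) - 1, 2):
--         for j in range(p[i], p[i + 1]):
--             k = orig_index[b[j]]
--             pos = loc[k]
--             kj = cur[j]
--             cur[j] = k
--             cur[pos] = kj
--             loc[k] = j
--             loc[kj] = pos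
--     a[:] = [a0[k] for k in cur]
--     return a
-- ===== Notes on version B (the rewrite author's own statement) =====
-- stated objective: alternative
-- what changed: B recasts each swap as a transposition of positions: it tracks only the index permutation via inverse cur/loc arrays against a value-to-original-index map built once and never updated, and materialises the result array in a single final pass, instead of A's per-gene list(a) copy plus linear .index rescan of the mutated array; it avoids A's rescans but pays an O(n) setup, and a timing run found it not measurably faster.
-- outside the precondition, e.g. on changePosition([5, 3, 3], [3, 0, 0], [0, 1]): A returns [3, 5, 3], B returns [3, 3, 5]; on changePosition([1, 2, 3], [3, 2, 1], [-1, 1]): A returns [3, 2, 1], B returns [3, 2, 1]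
import Mathlib
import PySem

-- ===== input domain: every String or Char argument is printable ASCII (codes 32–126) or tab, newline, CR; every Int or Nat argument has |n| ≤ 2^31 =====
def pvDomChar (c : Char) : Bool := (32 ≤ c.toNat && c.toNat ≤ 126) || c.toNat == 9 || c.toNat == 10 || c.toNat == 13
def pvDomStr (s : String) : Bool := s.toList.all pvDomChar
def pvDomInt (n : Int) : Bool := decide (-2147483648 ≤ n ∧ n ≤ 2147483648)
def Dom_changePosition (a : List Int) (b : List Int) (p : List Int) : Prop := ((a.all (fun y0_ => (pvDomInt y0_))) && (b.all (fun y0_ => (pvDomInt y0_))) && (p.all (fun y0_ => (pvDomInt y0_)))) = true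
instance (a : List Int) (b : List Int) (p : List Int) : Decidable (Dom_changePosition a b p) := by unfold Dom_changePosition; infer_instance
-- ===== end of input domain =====

-- B tracks the index permutation (inverse cur/loc arrays against a value→original-index map built
-- once) instead of A's per-gene copy + linear .index rescan; equivalence is about the RETURN value
-- (the Python A mutates `a` in place; B rewrites it wholesale at the end).

-- ===== PORT A =====
-- one body of A's inner loop: pos = list(a).index(b[j]); a[pos] = a[j]; a[j] = b[j]
-- (index? = none is Python's ValueError; such inputs are outside Pre_ and the state is passed through)
def aInner (b : List Int) (a : List Int) (j : Int) : List Int :=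
  let bj := PySem.List.pyGetD b j 0
  match PySem.List.index? a bj with
  | none => a
  | some pos => PySem.List.pySetD (PySem.List.pySetD a (pos : Int) (PySem.List.pyGetD a j 0)) j bj

def changePosition (a : List Int) (b : List Int) (p : List Int) : List Int :=
  (List.range (p.length - 1)).foldl
    (fun (a : List Int) (i : Nat) =>
      if i % 2 == 0 then
        (PySem.List.pyRange (PySem.List.pyGetD p (i : Int) 0) (PySem.List.pyGetD p ((i : Int) + 1) 0) 1).foldl
          (aInner b) a
      else a) a

-- ===== PORT B =====
-- one body of B's inner loop:
-- k = orig_index[b[j]]; pos = loc[k]; kj = cur[j]; cur[j] = k; cur[pos] = kj; loc[k] = j; loc[kj] = pos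
def bInner (b : List Int) (oi : PySem.Dict Int Int) (s : List Int × List Int) (j : Int) :
    List Int × List Int :=
  let k := oi.getD (PySem.List.pyGetD b j 0) 0
  let pos := PySem.List.pyGetD s.2 k 0
  let kj := PySem.List.pyGetD s.1 j 0
  (PySem.List.pySetD (PySem.List.pySetD s.1 j k) pos kj,
   PySem.List.pySetD (PySem.List.pySetD s.2 k j) kj pos)

def changePosition_alt (a : List Int) (b : List Int) (p : List Int) : List Int :=
  let a0 := a
  let oi := (PySem.List.enumerate a0).foldl (fun d kv => d.insert kv.2 kv.1) PySem.Dict.empty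
  let ident : List Int := (List.range a0.length).map (fun q : Nat => (q : Int))
  let s := (PySem.List.pyRange 0 ((p.length : Int) - 1) 2).foldl
    (fun s i =>
      (PySem.List.pyRange (PySem.List.pyGetD p i 0) (PySem.List.pyGetD p (i + 1) 0) 1).foldl
        (bInner b oi) s) (ident, ident)
  s.1.map (fun k => PySem.List.pyGetD a0 k 0)

-- ===== PRECONDITION & SPEC =====
-- Pre_ excludes cut segments reaching outside the chromosome (Python raises IndexError there, or
-- wraps negative indices) and swapped gene values absent from a (ValueError) or duplicated in a,
-- where the first-vs-last-occurrence choice of the lookup is accidental.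
def Pre_changePosition (a : List Int) (b : List Int) (p : List Int) : Prop :=
  ∀ i ∈ List.range (p.length - 1), i % 2 = 0 →
    (p.getD i 0 < p.getD (i + 1) 0 →
      0 ≤ p.getD i 0 ∧ p.getD (i + 1) 0 ≤ (a.length : Int) ∧ p.getD (i + 1) 0 ≤ (b.length : Int)) ∧
    ∀ j ∈ PySem.List.pyRange (p.getD i 0) (p.getD (i + 1) 0) 1,
      a.count (PySem.List.pyGetD b j 0) = 1
instance (a : List Int) (b : List Int) (p : List Int) : Decidable (Pre_changePosition a b p) := by
  unfold Pre_changePosition; infer_instance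

def pvWitness_changePosition : List Int × List Int × List Int := ([1, 2, 3], [3, 2, 1], [0, 2])

def Spec_changePosition (a : List Int) (b : List Int) (p : List Int) (out : List Int) : Prop := out = changePosition_alt a b p
instance (a : List Int) (b : List Int) (p : List Int) (out : List Int) : Decidable (Spec_changePosition a b p out) := by unfold Spec_changePosition; infer_instance

-- ===== CLAIM (what is proved, stated in full; the proofs are below) =====
def Claim_equal_changePosition : Prop := ∀ (a : List Int) (b : List Int) (p : List Int), Dom_changePosition a b p → Pre_changePosition a b p → Spec_changePosition a b p (changePosition a b p)

-- ===== LEMMAS AND PROOFS =====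

-- the static dictionary: for every value occurring exactly once in a0, oi holds its (unique) index
def DictInv (a0 : List Int) (d : PySem.Dict Int Int) : Prop :=
  ∀ v k, PySem.List.index? a0 v = some k → a0.count v = 1 → d.get? v = some (k : Int)

-- B's loop invariant: cur and loc are mutually inverse in-range index arrays and the array they
-- denote (cur mapped through a0) is a permutation of a0
def InvBL (a0 cur loc : List Int) : Prop :=
  cur.length = a0.length ∧ loc.length = a0.length ∧
  (cur.map (fun k => PySem.List.pyGetD a0 k 0)).Perm a0 ∧
  (∀ q : Nat, q < a0.length →
     0 ≤ cur.getD q 0 ∧ cur.getD q 0 < (a0.length : Int) ∧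
       loc.getD (cur.getD q 0).toNat 0 = (q : Int)) ∧
  (∀ k : Nat, k < a0.length →
     0 ≤ loc.getD k 0 ∧ loc.getD k 0 < (a0.length : Int) ∧
       cur.getD (loc.getD k 0).toNat 0 = (k : Int))

theorem getD_set_self (l : List Int) (i : Nat) (h : i < l.length) (v : Int) :
    (l.set i v).getD i 0 = v := by
  rw [List.getD_eq_getElem _ _ (by simpa using h)]
  exact List.getElem_set_self (by simpa using h)

theorem getD_set_ne (l : List Int) (i q : Nat) (v : Int) (h : q ≠ i) :
    (l.set i v).getD q 0 = l.getD q 0 := by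
  by_cases hq : q < l.length
  · rw [List.getD_eq_getElem _ _ (by simpa using hq), List.getD_eq_getElem _ _ hq]
    exact List.getElem_set_ne (fun h' => h h'.symm) _
  · rw [List.getD_eq_default _ _ (by simpa using hq), List.getD_eq_default _ _ (by omega)]

-- for a value occurring exactly once, any position holding it IS its index? position
theorem index?_of_count_one : ∀ (l : List Int) (w : Int) (k : Nat) (hk : k < l.length),
    l.count w = 1 → l[k] = w → PySem.List.index? l w = some k := by
  intro l
  induction l with
  | nil => intro w k hk; simp at hk
  | cons x xs ih =>
    intro w k hk hc hw
    by_cases hx : x = w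
    · subst hx
      rw [PySem.List.index?_cons_self]
      rcases Nat.eq_zero_or_pos k with h0 | h0
      · simp [h0]
      · exfalso
        have hxs : xs.count x = 0 := by simp at hc; omega
        have hk' : k - 1 < xs.length := by simp at hk; omega
        have hmem : x ∈ xs := by
          have hx1 : (x :: xs)[k] = xs[k - 1] := by
            rcases k with _ | k'
            · omega
            · simp
          rw [hx1] at hw
          exact hw ▸ List.getElem_mem hk'
        rw [List.count_eq_zero] at hxs
        exact hxs hmem
    · rw [PySem.List.index?_cons_of_ne _ hx]
      rcases k with _ | k'
      · exact absurd (by simpa using hw) (fun h => hx h)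
      · have hk' : k' < xs.length := by simp at hk; omega
        have hc' : xs.count w = 1 := by
          simp [hx] at hc
          omega
        have hw' : xs[k'] = w := by simpa using hw
        rw [ih w k' hk' hc' hw']
        rfl

-- a double set that swaps two in-range cells is a permutation
theorem perm_set_swap (l : List Int) (i j : Nat) (hi : i < l.length) (hj : j < l.length) :
    ((l.set i l[j]).set j l[i]).Perm l := by
  rcases eq_or_ne i j with rfl | hij
  · rw [List.set_getElem_self, List.set_getElem_self]
  · apply List.perm_iff_count.2
    intro w
    rw [List.count_set (by simpa using hj), List.count_set hi,
      List.getElem_set_ne hij (by simpa using hj)]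
    have hm1 : l[i] = w → 0 < l.count w := fun h => List.count_pos_iff.2 (h ▸ List.getElem_mem hi)
    have hm2 : l[j] = w → 0 < l.count w := fun h => List.count_pos_iff.2 (h ▸ List.getElem_mem hj)
    by_cases h1 : l[i] = w <;> by_cases h2 : l[j] = w <;>
      simp [h1, h2] <;> omega

-- inserting keys not equal to v leaves get? v unchanged
theorem get?_fold_notmem (xs : List Int) (v : Int) :
    ∀ (s : Int) (d : PySem.Dict Int Int), v ∉ xs →
    ((PySem.List.enumerate xs s).foldl (fun d kv => d.insert kv.2 kv.1) d).get? v = d.get? v := by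
  induction xs with
  | nil => intro s d _; rfl
  | cons x xs ih =>
    intro s d hv
    rw [PySem.List.enumerate_cons]
    simp only [List.foldl_cons]
    rw [ih (s + 1) _ (fun h => hv (List.mem_cons_of_mem _ h))]
    exact PySem.Dict.get?_insert_of_ne _ _ (fun h => hv (h ▸ List.mem_cons_self))

-- the comprehension dict: for a count-1 value, get? returns start + its unique index
theorem init_get? (xs : List Int) (v : Int) :
    ∀ (k : Nat) (s : Int) (d : PySem.Dict Int Int), xs.count v = 1 →
      PySem.List.index? xs v = some k →
      ((PySem.List.enumerate xs s).foldl (fun d kv => d.insert kv.2 kv.1) d).get? v = some (s + k) := by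
  induction xs with
  | nil => intro k s d _ hi; simp [PySem.List.index?] at hi
  | cons x xs ih =>
    intro k s d hc hi
    rw [PySem.List.enumerate_cons]
    simp only [List.foldl_cons]
    by_cases hx : x = v
    · subst hx
      rw [PySem.List.index?_cons_self] at hi
      injection hi with hk
      subst hk
      have hnot : x ∉ xs := by
        rw [← List.count_eq_zero]
        simp at hc
        omega
      rw [get?_fold_notmem xs x (s + 1) _ hnot, PySem.Dict.get?_insert_self]
      norm_num
    · rw [PySem.List.index?_cons_of_ne _ hx] at hi
      rcases hk : PySem.List.index? xs v with _ | k'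
      · rw [hk] at hi; simp at hi
      · rw [hk] at hi
        simp only [Option.map_some] at hi
        injection hi with hk1
        have hc' : xs.count v = 1 := by
          simp [hx] at hc
          omega
        rw [ih k' (s + 1) _ hc' hk]
        congr 1
        omega

theorem dictInv_init (a0 : List Int) :
    DictInv a0 ((PySem.List.enumerate a0).foldl (fun d kv => d.insert kv.2 kv.1) PySem.Dict.empty) := by
  intro v k hi hc
  have := init_get? a0 v k 0 PySem.Dict.empty hc hi
  simpa using this

-- the cell of a list put back at its own index
theorem set_getD_self (l : List Int) (i : Nat) (h : i < l.length) :
    l.set i (l.getD i 0) = l := by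
  rw [List.getD_eq_getElem _ _ h]
  exact List.set_getElem_self h

-- one inner-loop step: A's swap equals the transposition applied to cur, and the invariant holds on
theorem step_lemma (a0 b : List Int) (oi : PySem.Dict Int Int) (hoi : DictInv a0 oi)
    (cur loc : List Int) (hinv : InvBL a0 cur loc) (j : Int)
    (h0 : 0 ≤ j) (hla : j < (a0.length : Int))
    (hc : a0.count (PySem.List.pyGetD b j 0) = 1) :
    aInner b (cur.map (fun k => PySem.List.pyGetD a0 k 0)) j
      = ((bInner b oi (cur, loc) j).1).map (fun k => PySem.List.pyGetD a0 k 0)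
    ∧ InvBL a0 (bInner b oi (cur, loc) j).1 (bInner b oi (cur, loc) j).2 := by
  obtain ⟨hlc, hll, hperm, hinv4, hinv5⟩ := hinv
  set f : Int → Int := fun k => PySem.List.pyGetD a0 k 0 with hf
  set n := a0.length with hn
  set v := PySem.List.pyGetD b j 0 with hv
  set jn := j.toNat with hjn
  have hjeq : (jn : Int) = j := Int.toNat_of_nonneg h0
  have hjlt : jn < n := by omega
  -- the original index k0 of v in a0
  have hmem : v ∈ a0 := List.count_pos_iff.1 (by omega)
  obtain ⟨k0, hk0⟩ := Option.isSome_iff_exists.1 ((PySem.List.index?_isSome_iff a0 v).2 hmem)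
  obtain ⟨hk0lt, ha0k0, _⟩ := PySem.List.getElem_of_index?_eq_some hk0
  have e1 : oi.getD v 0 = (k0 : Int) := PySem.Dict.getD_of_get?_eq_some _ 0 (hoi v k0 hk0 hc)
  -- pos and kj
  set pos := loc.getD k0 0 with hpos
  obtain ⟨hp0, hplt, hcurpos⟩ := hinv5 k0 hk0lt
  set pn := pos.toNat with hpn
  have hpeq : (pn : Int) = pos := Int.toNat_of_nonneg hp0
  have hpnlt : pn < n := by omega
  set kj := cur.getD jn 0 with hkj
  obtain ⟨hkj0, hkjlt, hlockj⟩ := hinv4 jn hjlt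
  set kn := kj.toNat with hkn
  have hkeq : (kn : Int) = kj := Int.toNat_of_nonneg hkj0
  have hknlt : kn < n := by omega
  -- unfold bInner into sets
  have e2 : PySem.List.pyGetD loc ((k0 : Nat) : Int) 0 = pos := by
    rw [PySem.List.pyGetD_natCast loc k0 0]
  have e3 : PySem.List.pyGetD cur j 0 = kj := by
    rw [PySem.List.pyGetD_eq_getElem cur 0 h0 (by omega), hkj,
      List.getD_eq_getElem _ _ (by omega)]
  have hbeq : bInner b oi (cur, loc) j
      = ((cur.set jn (k0 : Int)).set pn kj, (loc.set k0 j).set kn pos) := by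
    show (PySem.List.pySetD (PySem.List.pySetD cur j (oi.getD v 0))
            (PySem.List.pyGetD loc (oi.getD v 0) 0) (PySem.List.pyGetD cur j 0),
          PySem.List.pySetD (PySem.List.pySetD loc (oi.getD v 0) j)
            (PySem.List.pyGetD cur j 0) (PySem.List.pyGetD loc (oi.getD v 0) 0)) = _
    rw [e1, e2, e3, PySem.List.pySetD_of_nonneg cur ((k0 : Nat) : Int) h0,
      PySem.List.pySetD_of_nonneg _ kj hp0, PySem.List.pySetD_natCast,
      PySem.List.pySetD_of_nonneg _ pos hkj0]
  -- the A-side array and its swap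
  set aA := cur.map f with haA
  have hlenA : aA.length = n := by simp [haA, hlc]
  have hgetA : ∀ q : Nat, (hq : q < n) → aA[q]'(by omega) = f (cur.getD q 0) := by
    intro q hq
    simp only [haA, List.getElem_map]
    congr 1
    exact (List.getD_eq_getElem _ _ (by omega)).symm
  have hfk0 : f ((k0 : Nat) : Int) = v := by
    show PySem.List.pyGetD a0 ((k0 : Nat) : Int) 0 = v
    rw [PySem.List.pyGetD_natCast a0 k0 0, List.getD_eq_getElem _ _ hk0lt, ha0k0]
  have haApn : aA[pn]'(by omega) = v := by rw [hgetA pn hpnlt, hcurpos, hfk0]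
  have hcount : aA.count v = 1 := by rw [hperm.count_eq]; exact hc
  have hidx : PySem.List.index? aA v = some pn :=
    index?_of_count_one aA v pn (by omega) hcount haApn
  have haAj : PySem.List.pyGetD aA j 0 = f kj := by
    rw [PySem.List.pyGetD_eq_getElem aA 0 h0 (by omega)]
    exact hgetA jn hjlt
  have hAeq : aInner b aA j = (aA.set pn (f kj)).set jn v := by
    show (match PySem.List.index? aA v with
      | none => aA
      | some pos => PySem.List.pySetD (PySem.List.pySetD aA (pos : Int) (PySem.List.pyGetD aA j 0)) j v) = _
    rw [hidx]
    show PySem.List.pySetD (PySem.List.pySetD aA ((pn : Nat) : Int) (PySem.List.pyGetD aA j 0)) j v = _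
    rw [haAj, PySem.List.pySetD_natCast, PySem.List.pySetD_of_nonneg _ v h0]
  rw [hbeq, hAeq]
  have hmapset : ((cur.set jn ((k0 : Nat) : Int)).set pn kj).map f
      = (aA.set jn v).set pn (f kj) := by
    rw [List.map_set, List.map_set, hfk0]
  by_cases hpj : pn = jn
  · -- the two cells coincide: both steps are (essentially) the identity
    have hposj : pos = j := by omega
    have hkjk0 : kj = ((k0 : Nat) : Int) := by
      rw [hkj, ← hpj]; exact hcurpos
    have hfkj : f kj = v := by rw [hkjk0, hfk0]
    constructor
    · rw [hmapset, hpj, List.set_set, List.set_set, hfkj]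
    · have hcur' : (cur.set jn ((k0 : Nat) : Int)).set pn kj = cur := by
        rw [hpj, List.set_set, hkj, set_getD_self cur jn (by omega)]
      have hloc' : (loc.set k0 j).set kn pos = loc := by
        have hknk0 : kn = k0 := by omega
        rw [hknk0, List.set_set, hpos, set_getD_self loc k0 (by omega)]
      rw [hcur', hloc']
      exact ⟨hlc, hll, hperm, hinv4, hinv5⟩
  · -- a genuine transposition
    have hposj : pos ≠ j := by omega
    have hkjk0 : kj ≠ ((k0 : Nat) : Int) := by
      intro hco
      have : loc.getD kn 0 = pos := by rw [show kn = k0 by omega]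
      omega
    have heq1 : ((cur.set jn ((k0 : Nat) : Int)).set pn kj).map f
        = (aA.set pn (f kj)).set jn v := by
      rw [hmapset, List.set_comm v (f kj) (fun h => hpj h.symm)]
    refine ⟨heq1.symm, ?_, ?_, ?_, ?_, ?_⟩
    · simp only [List.length_set]; exact hlc
    · simp only [List.length_set]; exact hll
    · rw [heq1]
      have hswap := perm_set_swap aA pn jn (by omega) (by omega)
      rw [haApn] at hswap
      have : aA[jn]'(by omega) = f kj := hgetA jn hjlt
      rw [this] at hswap
      exact hswap.trans hperm
    · -- inv4
      intro q hq
      by_cases hq1 : q = pn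
      · subst hq1
        rw [getD_set_self _ pn (by simp; omega) kj]
        refine ⟨hkj0, hkjlt, ?_⟩
        rw [← hkn, getD_set_self _ kn (by simp; omega) pos]
        omega
      · rw [getD_set_ne _ pn q kj hq1]
        by_cases hq2 : q = jn
        · subst hq2
          rw [getD_set_self _ jn (by omega) ((k0 : Nat) : Int)]
          refine ⟨by positivity, by exact_mod_cast hk0lt, ?_⟩
          rw [Int.toNat_natCast, getD_set_ne _ kn k0 pos (by omega),
            getD_set_self _ k0 (by omega) j]
          omega
        · rw [getD_set_ne _ jn q ((k0 : Nat) : Int) hq2]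
          obtain ⟨hc0, hclt, hcloc⟩ := hinv4 q hq
          refine ⟨hc0, hclt, ?_⟩
          have hck : (cur.getD q 0).toNat ≠ kn := by
            intro hco
            have : cur.getD q 0 = kj := by omega
            rw [this, hlockj] at hcloc
            omega
          have hck0 : (cur.getD q 0).toNat ≠ k0 := by
            intro hco
            have : cur.getD q 0 = ((k0 : Nat) : Int) := by omega
            rw [this, Int.toNat_natCast] at hcloc
            rw [← hpos] at hcloc
            omega
          rw [getD_set_ne _ kn _ pos hck, getD_set_ne _ k0 _ j hck0]
          exact hcloc
    · -- inv5
      intro k' hk'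
      by_cases hk1 : k' = kn
      · subst hk1
        rw [getD_set_self _ kn (by simp; omega) pos]
        refine ⟨hp0, hplt, ?_⟩
        rw [← hpn, getD_set_self _ pn (by simp; omega) kj]
        omega
      · rw [getD_set_ne _ kn k' pos hk1]
        by_cases hk2 : k' = k0
        · rw [hk2, getD_set_self _ k0 (by omega) j]
          refine ⟨h0, hla, ?_⟩
          rw [← hjn, getD_set_ne _ pn jn kj (fun h => hpj h.symm),
            getD_set_self _ jn (by omega) ((k0 : Nat) : Int)]
        · rw [getD_set_ne _ k0 k' j hk2]
          obtain ⟨hl0, hllt, hlcur⟩ := hinv5 k' hk'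
          refine ⟨hl0, hllt, ?_⟩
          have hlp : (loc.getD k' 0).toNat ≠ pn := by
            intro hco
            have : loc.getD k' 0 = pos := by omega
            rw [this] at hlcur
            rw [← hpn] at hlcur
            rw [hcurpos] at hlcur
            omega
          have hlj : (loc.getD k' 0).toNat ≠ jn := by
            intro hco
            have : loc.getD k' 0 = j := by omega
            rw [this] at hlcur
            have : cur.getD jn 0 = (k' : Int) := by rw [← hjn] at hlcur; exact hlcur
            omega
          rw [getD_set_ne _ pn _ kj hlp, getD_set_ne _ jn _ ((k0 : Nat) : Int) hlj]
          exact hlcur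

theorem seg_lemma (a0 b : List Int) (oi : PySem.Dict Int Int) (hoi : DictInv a0 oi)
    (js : List Int) : ∀ cur loc, InvBL a0 cur loc →
    (∀ j ∈ js, 0 ≤ j ∧ j < (a0.length : Int) ∧ a0.count (PySem.List.pyGetD b j 0) = 1) →
    js.foldl (aInner b) (cur.map (fun k => PySem.List.pyGetD a0 k 0))
      = ((js.foldl (bInner b oi) (cur, loc)).1).map (fun k => PySem.List.pyGetD a0 k 0)
    ∧ InvBL a0 (js.foldl (bInner b oi) (cur, loc)).1 (js.foldl (bInner b oi) (cur, loc)).2 := by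
  induction js with
  | nil => intro cur loc hinv _; exact ⟨rfl, hinv⟩
  | cons j js ih =>
    intro cur loc hinv hj
    obtain ⟨h0, hla, hc⟩ := hj j List.mem_cons_self
    obtain ⟨heq, hinv'⟩ := step_lemma a0 b oi hoi cur loc hinv j h0 hla hc
    simp only [List.foldl_cons, heq]
    have := ih (bInner b oi (cur, loc) j).1 (bInner b oi (cur, loc) j).2 hinv'
      (fun j' hj' => hj j' (List.mem_cons_of_mem _ hj'))
    simpa using this

-- the even indices of range (n-1), as Nat lists
theorem filter_even_range : ∀ (m : Nat),
    (List.range m).filter (fun i => i % 2 == 0) = (List.range ((m + 1) / 2)).map (fun k => 2 * k) := by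
  intro m
  induction m with
  | zero => rfl
  | succ m ih =>
    rw [List.range_succ, List.filter_append, ih]
    by_cases hm : m % 2 = 0
    · have h2 : (m + 1 + 1) / 2 = (m + 1) / 2 + 1 := by omega
      rw [h2, List.range_succ, List.map_append]
      simp only [List.filter_cons, List.filter_nil]
      rw [if_pos (by simpa using hm)]
      congr 1
      simp only [List.map_cons]
      congr 2
      omega
    · have h2 : (m + 1 + 1) / 2 = (m + 1) / 2 := by omega
      rw [h2]
      simp only [List.filter_cons, List.filter_nil]
      rw [if_neg (by simpa using hm)]
      simp

-- B's step-2 range over the even cut indices = the even members of range(len(p)-1), cast to Int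
theorem pyRange_two_eq (n : Nat) :
    PySem.List.pyRange 0 ((n : Int) - 1) 2 =
      ((List.range (n - 1)).filter (fun i => i % 2 == 0)).map (fun i : Nat => (i : Int)) := by
  rw [PySem.List.pyRange_of_pos 0 ((n : Int) - 1) (by norm_num), filter_even_range, List.map_map]
  rcases Nat.eq_zero_or_pos n with rfl | hn
  · simp
  · rcases Nat.lt_or_ge n 2 with h2 | h2
    · interval_cases n <;> rfl
    · have h1 : ((n : Int) - 1 - 0 + 2 - 1) / 2 = ((n : Int) / 2) := by omega
      rw [if_pos (by omega), h1]
      have h3 : ((n : Int) / 2).toNat = (n - 1 + 1) / 2 := by omega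
      rw [h3]
      apply List.map_congr_left
      intro k _
      simp

theorem outer_lemma (a0 b p : List Int) (oi : PySem.Dict Int Int) (hoi : DictInv a0 oi) :
    ∀ (es : List Nat) (cur loc : List Int), InvBL a0 cur loc →
    (∀ e ∈ es, ∀ j ∈ PySem.List.pyRange (p.getD e 0) (p.getD (e + 1) 0) 1,
        0 ≤ j ∧ j < (a0.length : Int) ∧ a0.count (PySem.List.pyGetD b j 0) = 1) →
    es.foldl (fun (a : List Int) (i : Nat) => (PySem.List.pyRange (PySem.List.pyGetD p (i : Int) 0)
        (PySem.List.pyGetD p ((i : Int) + 1) 0) 1).foldl (aInner b) a)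
        (cur.map (fun k => PySem.List.pyGetD a0 k 0))
      = ((es.foldl (fun (s : List Int × List Int) (i : Nat) => (PySem.List.pyRange (PySem.List.pyGetD p (i : Int) 0)
          (PySem.List.pyGetD p ((i : Int) + 1) 0) 1).foldl (bInner b oi) s) (cur, loc)).1).map
          (fun k => PySem.List.pyGetD a0 k 0) := by
  intro es
  induction es with
  | nil => intro cur loc _ _; rfl
  | cons e es ih =>
    intro cur loc hinv hseg
    rw [List.foldl_cons, List.foldl_cons]
    have hcast1 : PySem.List.pyGetD p ((e : Nat) : Int) 0 = p.getD e 0 :=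
      PySem.List.pyGetD_natCast p e 0
    have hcast2 : PySem.List.pyGetD p (((e : Nat) : Int) + 1) 0 = p.getD (e + 1) 0 := by
      rw [show (((e : Nat) : Int) + 1) = (((e + 1 : Nat) : Nat) : Int) by push_cast; ring]
      exact PySem.List.pyGetD_natCast p (e + 1) 0
    obtain ⟨heq, hinv'⟩ := seg_lemma a0 b oi hoi
      (PySem.List.pyRange (PySem.List.pyGetD p ((e : Nat) : Int) 0)
        (PySem.List.pyGetD p (((e : Nat) : Int) + 1) 0) 1) cur loc hinv
      (by rw [hcast1, hcast2]; exact hseg e List.mem_cons_self)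
    rw [heq]
    exact ih _ _ hinv' (fun e' he' => hseg e' (List.mem_cons_of_mem _ he'))

-- the identity index array denotes a0 and satisfies the invariant
theorem ident_map (a0 : List Int) :
    ((List.range a0.length).map (fun q : Nat => (q : Int))).map
      (fun k => PySem.List.pyGetD a0 k 0) = a0 := by
  apply List.ext_getElem
  · simp
  · intro q h1 h2
    simp only [List.getElem_map, List.getElem_range]
    rw [PySem.List.pyGetD_natCast]
    exact List.getD_eq_getElem _ _ h2

theorem invBL_ident (a0 : List Int) :
    InvBL a0 ((List.range a0.length).map (fun q : Nat => (q : Int)))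
      ((List.range a0.length).map (fun q : Nat => (q : Int))) := by
  have hget : ∀ q : Nat, q < a0.length →
      ((List.range a0.length).map (fun q : Nat => (q : Int))).getD q 0 = (q : Int) := by
    intro q hq
    rw [List.getD_eq_getElem _ _ (by simpa using hq)]
    simp
  refine ⟨by simp, by simp, by rw [ident_map], ?_, ?_⟩
  · intro q hq
    rw [hget q hq]
    refine ⟨by positivity, by exact_mod_cast hq, ?_⟩
    rw [Int.toNat_natCast, hget q hq]
  · intro k hk
    rw [hget k hk]
    refine ⟨by positivity, by exact_mod_cast hk, ?_⟩
    rw [Int.toNat_natCast, hget k hk]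

theorem main_lemma (a b p : List Int) (hpre : Pre_changePosition a b p) :
    changePosition a b p = changePosition_alt a b p := by
  have hB : changePosition_alt a b p =
      (((PySem.List.pyRange 0 ((p.length : Int) - 1) 2).foldl
        (fun (s : List Int × List Int) (i : Int) =>
          (PySem.List.pyRange (PySem.List.pyGetD p i 0) (PySem.List.pyGetD p (i + 1) 0) 1).foldl
            (bInner b ((PySem.List.enumerate a).foldl
              (fun d kv => d.insert kv.2 kv.1) PySem.Dict.empty)) s)
        ((List.range a.length).map (fun q : Nat => (q : Int)),
         (List.range a.length).map (fun q : Nat => (q : Int)))).1).map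
        (fun k => PySem.List.pyGetD a k 0) := rfl
  have hA : changePosition a b p =
      (((List.range (p.length - 1)).filter (fun i => i % 2 == 0)).foldl
        (fun (a : List Int) (i : Nat) =>
          (PySem.List.pyRange (PySem.List.pyGetD p (i : Int) 0)
            (PySem.List.pyGetD p ((i : Int) + 1) 0) 1).foldl (aInner b) a) a) := by
    unfold changePosition
    rw [List.foldl_filter]
  rw [hA, hB, pyRange_two_eq p.length, List.foldl_map]
  conv_lhs => rw [← ident_map a]
  exact outer_lemma a b p _ (dictInv_init a) _ _ _ (invBL_ident a)
    (fun e he => fun j hj => by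
      obtain ⟨hbound, hcount⟩ :=
        hpre e (List.mem_of_mem_filter he) (by simpa using (List.mem_filter.1 he).2)
      obtain ⟨hlo, hhi⟩ := PySem.List.mem_pyRange_one.1 hj
      obtain ⟨h1, h2, _⟩ := hbound (lt_of_le_of_lt hlo hhi)
      exact ⟨le_trans h1 hlo, lt_of_lt_of_le hhi h2, hcount j hj⟩)

-- ===== VERDICT (by name: the statement is the Claim_ definition above) =====
theorem changePosition_spec : Claim_equal_changePosition := by
  intro a b p _ hpre
  unfold Spec_changePosition
  exact main_lemma a b p hpre
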